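-- pv_equiv track=rewrite | github.com/tranquilo12/woolly | api/utils/ai_services.py | _group_interactions
-- ===== SOURCE A (Python) =====
-- from typing import Dict, List, Tuple
--
-- def _group_interactions(convo: List[Tuple[str, str]]) -> List[List[Tuple[str, str]]]:
--     """
--     Group conversation into interactions: a user message followed by the next assistant message.
--     Unpaired trailing user or assistant messages are included as their own interaction.
--     """
--     interactions: List[List[Tuple[str, str]]] = []
--     buffer: List[Tuple[str, str]] = []
--     waiting_for_assistant = False
--
--     for role, content in convo:
--         if role == "user":
--             if buffer:
--                 interactions.append(buffer)
--                 buffer = []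
--             buffer.append((role, content))
--             waiting_for_assistant = True
--         elif role == "assistant":
--             if not buffer:
--                 # Assistant without preceding user -> standalone interaction
--                 interactions.append([(role, content)])
--                 waiting_for_assistant = False
--             else:
--                 buffer.append((role, content))
--                 interactions.append(buffer)
--                 buffer = []
--                 waiting_for_assistant = False
--         else:
--             # Unknown roles are appended to current buffer
--             buffer.append((role, content))
--
--     if buffer:
--         interactions.append(buffer)
--
--     return interactions
-- ===== SOURCE B (Python) =====
-- from typing import Dict, List, Tuple
--
-- def _group_interactions(convo: List[Tuple[str, str]]) -> List[List[Tuple[str, str]]]: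
--     """Index-based scan: each group is cut out in place with an inner while,
--     instead of maintaining a carried buffer/flush state."""
--     interactions: List[List[Tuple[str, str]]] = []
--     i = 0
--     n = len(convo)
--     while i < n:
--         role, content = convo[i]
--         if role == "assistant":
--             interactions.append([convo[i]])
--             i += 1
--         else:
--             group = [convo[i]]
--             i += 1
--             while i < n and convo[i][0] != "user" and convo[i][0] != "assistant":
--                 group.append(convo[i])
--                 i += 1
--             if i < n and convo[i][0] == "assistant":
--                 group.append(convo[i])
--                 i += 1
--             interactions.append(group)
--     return interactions
-- ===== Notes on version B (the rewrite author's own statement) =====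
-- stated objective: alternative
-- what changed: Replaces the carried buffer/flush state machine (buffer emptiness checks and an end-of-loop flush) with an index-based while loop that cuts each group out in place: a standalone assistant, or a group head plus an inner while absorbing unknown roles and an optional closing assistant.
import Mathlib
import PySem

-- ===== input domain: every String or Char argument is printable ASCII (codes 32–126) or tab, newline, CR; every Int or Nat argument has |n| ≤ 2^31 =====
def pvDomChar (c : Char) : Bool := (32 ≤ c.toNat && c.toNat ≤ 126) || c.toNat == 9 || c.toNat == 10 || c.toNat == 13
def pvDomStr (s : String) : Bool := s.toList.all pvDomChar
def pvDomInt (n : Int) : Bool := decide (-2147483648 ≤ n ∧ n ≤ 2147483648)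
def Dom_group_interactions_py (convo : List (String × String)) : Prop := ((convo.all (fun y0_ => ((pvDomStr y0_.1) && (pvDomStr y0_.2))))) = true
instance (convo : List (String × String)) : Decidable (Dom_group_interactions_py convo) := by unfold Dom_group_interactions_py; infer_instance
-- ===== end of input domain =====

-- ===== PORT A =====
-- A: single pass carrying (interactions, buffer); user flushes, assistant closes or stands alone,
-- unknown roles append to the buffer; trailing buffer flushed at the end.
def stepA (st : List (List (String × String)) × List (String × String))
    (rc : String × String) : List (List (String × String)) × List (String × String) :=
  let interactions := st.1
  let buffer := st.2
  if rc.1 == "user" then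
    ((if buffer.isEmpty then interactions else interactions ++ [buffer]), [rc])
  else if rc.1 == "assistant" then
    (if buffer.isEmpty then (interactions ++ [[rc]], [])
     else (interactions ++ [buffer ++ [rc]], []))
  else
    (interactions, buffer ++ [rc])

def group_interactions_py (convo : List (String × String)) : List (List (String × String)) :=
  let st := convo.foldl stepA ([], [])
  if st.2.isEmpty then st.1 else st.1 ++ [st.2]

-- ===== PORT B =====
-- B: index-based scan; altGo = outer while (at a fresh position), altInner = inner while with the
-- open group (absorbs unknown roles one at a time, then an optional closing assistant).
mutual
def altGo : List (String × String) → List (List (String × String))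
  | [] => []
  | rc :: rest =>
    if rc.1 == "assistant" then [rc] :: altGo rest
    else altInner [rc] rest
termination_by l => (l.length, 0)

def altInner (group : List (String × String)) : List (String × String) → List (List (String × String))
  | [] => [group]
  | rc :: rest =>
    if rc.1 != "user" && rc.1 != "assistant" then altInner (group ++ [rc]) rest
    else if rc.1 == "assistant" then (group ++ [rc]) :: altGo rest
    else group :: altGo (rc :: rest)
termination_by l => (l.length, 1)
end

def group_interactions_py_alt (convo : List (String × String)) : List (List (String × String)) :=
  altGo convo

-- ===== PRECONDITION & SPEC =====
def Spec_group_interactions_py (convo : List (String × String)) (out : List (List (String × String))) : Prop := out = group_interactions_py_alt convo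
instance (convo : List (String × String)) (out : List (List (String × String))) : Decidable (Spec_group_interactions_py convo out) := by unfold Spec_group_interactions_py; infer_instance

-- ===== CLAIM (what is proved, stated in full; the proofs are below) =====
def Claim_equal_group_interactions_py : Prop := ∀ (convo : List (String × String)), Dom_group_interactions_py convo → Spec_group_interactions_py convo (group_interactions_py convo)

-- ===== LEMMAS AND PROOFS =====

-- B's continuation for an A-state: empty buffer = outer while, nonempty buffer = inner while.
def contB (buffer : List (String × String)) (convo : List (String × String)) : List (List (String × String)) :=
  if buffer.isEmpty then altGo convo else altInner buffer convo

def finishA (st : List (List (String × String)) × List (String × String)) : List (List (String × String)) :=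
  if st.2.isEmpty then st.1 else st.1 ++ [st.2]

lemma main_inv : ∀ (convo : List (String × String)) (I : List (List (String × String)))
    (B : List (String × String)),
    finishA (convo.foldl stepA (I, B)) = I ++ contB B convo := by
  intro convo
  induction convo with
  | nil =>
    intro I B
    cases B with
    | nil => simp [finishA, contB, altGo]
    | cons b bs => simp [finishA, contB, altInner]
  | cons rc rest ih =>
    intro I B
    by_cases hu : rc.1 = "user"
    · by_cases hB : B = []
      · subst hB
        simp only [List.foldl_cons, stepA, hu, beq_self_eq_true, if_true, List.isEmpty_nil, ih]
        have hna : rc.1 ≠ "assistant" := by rw [hu]; decide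
        simp [contB, altGo, hna]
      · have hBe : B.isEmpty = false := by simpa [List.isEmpty_iff] using hB
        simp only [List.foldl_cons, stepA, hu, beq_self_eq_true, if_true, hBe, ih]
        have hna : rc.1 ≠ "assistant" := by rw [hu]; decide
        simp [contB, altInner, altGo, hBe, hu, List.append_assoc]
    · by_cases ha : rc.1 = "assistant"
      · by_cases hB : B = []
        · subst hB
          simp only [List.foldl_cons, stepA, ha, beq_self_eq_true, beq_iff_eq,
            if_true, List.isEmpty_nil, ih]
          simp [contB, altGo, ha]
        · have hBe : B.isEmpty = false := by simpa [List.isEmpty_iff] using hB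
          simp only [List.foldl_cons, stepA, ha, beq_self_eq_true, beq_iff_eq,
            if_true, hBe, ih]
          simp [contB, altInner, hBe, ha, List.append_assoc]
      · simp only [List.foldl_cons, stepA, beq_iff_eq, hu, ha, if_false, ih]
        by_cases hB : B = []
        · subst hB
          simp [contB, altGo, ha]
        · have hBe : B.isEmpty = false := by simpa [List.isEmpty_iff] using hB
          simp [contB, altInner, hBe, hu, ha]

-- ===== VERDICT (by name: the statement is the Claim_ definition above) =====
theorem group_interactions_py_spec : Claim_equal_group_interactions_py := by
  intro convo _
  unfold Spec_group_interactions_py group_interactions_py group_interactions_py_alt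
  simpa [finishA, contB] using main_inv convo [] []
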